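-- pv_equiv track=rewrite | github.com/KikoBelchi/2D_to_3D_Hausdorff | submesh.py | n_pairs_of_adjacent_vertices_of_submesh
-- ===== SOURCE A (Python) =====
-- def matrix_coord_from_idx(idx, num_vertices_width = 103):
--     """ Input: the index of a vertex within the reordered vertex list
--     (i.e., not from the vertex list ordered as directly given by Blender)
--
--     Output: matrix_coord is a tuple of the form (x, y),
--     where these are the matrix coordinates of a vertex seen as a vertex of the original mesh (not as a vertex of a submesh).
--     These (x, y) matrix coordinates correspond to vertical downwards and horizontal rightwards, respectively. """
--     matrix_coord_from_idx_0 = int(int(idx) // num_vertices_width)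
--     matrix_coord_from_idx_1 = idx%num_vertices_width
--     return matrix_coord_from_idx_0, matrix_coord_from_idx_1
--
-- def idx_from_matrix_coord(matrix_coord, num_vertices_width = 103):
--     """ Input: matrix_coord is a tuple of the form (x, y), where these are the matrix coordinates of a vertex seen as a vertex of the original mesh (not as a vertex of a submesh).
--     These (x, y) matrix coordinates correspond to vertical downwards and horizontal rightwards, respectively.
--
--     Output: the index of the vertex within the reordered vertex list
--     (i.e., not from the vertex list ordered as directly given by Blender) """
--     return matrix_coord[1] + matrix_coord[0]*num_vertices_width
--
-- def Allen_neighbours_of_generic_vertex_in_mesh(matrix_coord, num_vertices_width = 103, num_vertices_height = 52):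
--     """ Input: matrix_coord is a tuple of the form (x, y),
--     where these are the matrix coordinates of a vertex of a mesh.
--     These (x, y) matrix coordinates correspond to vertical downwards and horizontal rightwards, respectively.
--
--     Output: list of matrix coordinates (as tuples (x, y)) of the neighbours of the input vertex which sit:
--     - on top,
--     - on top and on the right,
--     - on the right and
--     - below and on the right, making an Allen key shape hanging on top of the center vertex.
--     This way, we only select 4 of the 8 neighbours of the vertex,
--     but once we run this for all the vertices,
--     we will have all the pairs of neighbours and no pair will be repeated.
--
--     Note: (original mesh vs submesh)
--     The mesh all vertices are considered in for the matrix coordinates and for the notion of neighbour is the mesh with: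
--     - number of vertices in horizontal direction: num_vertices_width.
--     - number of vertices in vertical direction: num_vertices_height. """
--     neighbours = []
--     if matrix_coord[0]!=0:
--         # If vertex is not in the top row --> it has a neighbour right on top
--         neighbours.append((matrix_coord[0]-1, matrix_coord[1]))
--     if matrix_coord[0]!=0 and matrix_coord[1]!=(num_vertices_width-1):
--         # If vertex not in top row nor in last column --> it has a neighbour on top, on the right
--         neighbours.append((matrix_coord[0]-1, matrix_coord[1]+1))
--     if matrix_coord[1]!=(num_vertices_width-1):
--         # If vertex not in last column --> it has a neighbour on the right
--         neighbours.append((matrix_coord[0], matrix_coord[1]+1))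
--     if matrix_coord[0]!=(num_vertices_height-1) and matrix_coord[1]!=(num_vertices_width-1):
--         # If vertex not in last row nor in last column --> it has a neighbour below, on the right
--         neighbours.append((matrix_coord[0]+1, matrix_coord[1]+1))
--     return neighbours
--
-- def idx_within_submesh_of_Allen_neighbours_within_submesh(v_idx_submesh,
--                                                           submesh_num_vertices_vertical = 2,
--                                                           submesh_num_vertices_horizontal = 3):
--     """ Input:
--     - v_idx_mesh: index within the submesh of a vertex v of the submesh.
--     - submesh_num_vertices_horizontal: number of vertices in the submesh in the horizontal direction.
--     - submesh_num_vertices_vertical: number of vertices in the submesh in the vertical direction.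
--
--     This function finds a list of the Allen-key neighbours of v within the submesh.
--     The notion of Allen-key neighbour is explained in the description of Allen_neighbours_of_generic_vertex_in_mesh().
--     Output:
--     - list of indices within the submesh of these neighbours. """
--     # Convert index of v within the submesh to matrix coordinates within the submesh
--     v_matrix_coord_submesh = matrix_coord_from_idx(v_idx_submesh, num_vertices_width = submesh_num_vertices_horizontal)
--
--     # Find list of matrix coordinates within submesh of allen neighbours of v
--     neighbours_matrix_coord_submesh = Allen_neighbours_of_generic_vertex_in_mesh(
--         v_matrix_coord_submesh, num_vertices_width = submesh_num_vertices_horizontal,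
--         num_vertices_height = submesh_num_vertices_vertical)
--
--     # Convert matrix coordinates of neighbours within submesh to indices within submesh
--     neighbours_idx_submesh = [idx_from_matrix_coord(matrix_coord, num_vertices_width = submesh_num_vertices_horizontal)
--                               for matrix_coord in neighbours_matrix_coord_submesh]
--
--     return neighbours_idx_submesh
--
-- def n_pairs_of_adjacent_vertices_of_submesh(submesh_num_vertices_vertical, submesh_num_vertices_horizontal):
--     """ Input:
--     - submesh_num_vertices_horizontal: number of vertices in the submesh in the horizontal direction.
--     - submesh_num_vertices_vertical: number of vertices in the submesh in the vertical direction.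
--
--     Output:
--     - n_pairs: number of pairs of adjacent vertices
--     """
--     submesh_num_vertices = submesh_num_vertices_vertical * submesh_num_vertices_horizontal
--     n_pairs = 0
--     for v_idx_submesh in range(submesh_num_vertices):
--         for w_idx_submesh in idx_within_submesh_of_Allen_neighbours_within_submesh(
--             v_idx_submesh, submesh_num_vertices_vertical = submesh_num_vertices_vertical,
--             submesh_num_vertices_horizontal = submesh_num_vertices_horizontal):
--             n_pairs += 1
--     return n_pairs
-- ===== SOURCE B (Python) =====
-- def n_pairs_of_adjacent_vertices_of_submesh(submesh_num_vertices_vertical, submesh_num_vertices_horizontal):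
--     """Closed-form count of adjacent vertex pairs (horizontal + vertical + two diagonals)
--     in a V x H grid; an empty grid (a non-positive dimension) has no pairs."""
--     V = submesh_num_vertices_vertical
--     H = submesh_num_vertices_horizontal
--     if V <= 0 or H <= 0:
--         return 0
--     return V * (H - 1) + H * (V - 1) + 2 * (V - 1) * (H - 1)
-- ===== Notes on version B (the rewrite author's own statement) =====
-- stated objective: faster
-- what changed: Replaces the double loop over all vertices and their Allen-key neighbour lists with the closed-form edge count V*(H-1) + H*(V-1) + 2*(V-1)*(H-1) (0 if either dimension is non-positive).
-- intended difference: When both dimensions are negative (V<0 and H<0) A's range(V*H) is non-empty and A returns the meaningless count 4*V*H-2 from floor-division artefacts, while B returns 0, the intended pair count for a grid with no vertices. — e.g. on n_pairs_of_adjacent_vertices_of_submesh(-1, -1): A returns 2, B returns 0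
import Mathlib
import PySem

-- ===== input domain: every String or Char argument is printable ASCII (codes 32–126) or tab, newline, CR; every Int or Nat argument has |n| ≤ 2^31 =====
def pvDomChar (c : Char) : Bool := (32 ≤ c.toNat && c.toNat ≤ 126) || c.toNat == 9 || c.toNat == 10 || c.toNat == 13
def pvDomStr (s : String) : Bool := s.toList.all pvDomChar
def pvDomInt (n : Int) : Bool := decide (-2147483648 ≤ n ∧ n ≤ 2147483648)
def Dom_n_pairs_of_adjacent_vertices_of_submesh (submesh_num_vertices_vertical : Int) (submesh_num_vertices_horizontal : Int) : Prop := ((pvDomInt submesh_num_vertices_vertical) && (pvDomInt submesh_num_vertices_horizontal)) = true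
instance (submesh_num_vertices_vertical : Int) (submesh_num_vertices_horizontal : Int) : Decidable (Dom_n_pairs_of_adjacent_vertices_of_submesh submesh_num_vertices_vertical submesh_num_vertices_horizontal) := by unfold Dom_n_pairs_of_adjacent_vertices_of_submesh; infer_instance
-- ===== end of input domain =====

-- B replaces A's O(V*H) double loop by the closed-form edge count (objective: faster,
-- asymptotic).  On V<0 ∧ H<0 (see D_ below) B intentionally returns 0 where A returns junk.

-- ===== PORT A =====
-- matrix_coord_from_idx(idx, num_vertices_width)
def pvMatrixCoordFromIdx (idx : Int) (num_vertices_width : Int) : Int × Int :=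
  (PySem.Int.floordiv idx num_vertices_width, PySem.Int.mod idx num_vertices_width)

-- idx_from_matrix_coord(matrix_coord, num_vertices_width)
def pvIdxFromMatrixCoord (matrix_coord : Int × Int) (num_vertices_width : Int) : Int :=
  matrix_coord.2 + matrix_coord.1 * num_vertices_width

-- Allen_neighbours_of_generic_vertex_in_mesh(matrix_coord, num_vertices_width, num_vertices_height)
def pvAllenNeighbours (matrix_coord : Int × Int) (num_vertices_width : Int) (num_vertices_height : Int) : List (Int × Int) :=
  let neighbours : List (Int × Int) := []
  let neighbours := if matrix_coord.1 ≠ 0 then neighbours ++ [(matrix_coord.1 - 1, matrix_coord.2)] else neighbours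
  let neighbours := if matrix_coord.1 ≠ 0 ∧ matrix_coord.2 ≠ num_vertices_width - 1 then neighbours ++ [(matrix_coord.1 - 1, matrix_coord.2 + 1)] else neighbours
  let neighbours := if matrix_coord.2 ≠ num_vertices_width - 1 then neighbours ++ [(matrix_coord.1, matrix_coord.2 + 1)] else neighbours
  let neighbours := if matrix_coord.1 ≠ num_vertices_height - 1 ∧ matrix_coord.2 ≠ num_vertices_width - 1 then neighbours ++ [(matrix_coord.1 + 1, matrix_coord.2 + 1)] else neighbours
  neighbours

-- idx_within_submesh_of_Allen_neighbours_within_submesh(v_idx_submesh, V, H)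
def pvIdxOfAllenNeighbours (v_idx_submesh : Int) (submesh_num_vertices_vertical : Int) (submesh_num_vertices_horizontal : Int) : List Int :=
  let v_matrix_coord_submesh := pvMatrixCoordFromIdx v_idx_submesh submesh_num_vertices_horizontal
  let neighbours_matrix_coord_submesh := pvAllenNeighbours v_matrix_coord_submesh submesh_num_vertices_horizontal submesh_num_vertices_vertical
  neighbours_matrix_coord_submesh.map (fun matrix_coord => pvIdxFromMatrixCoord matrix_coord submesh_num_vertices_horizontal)

def n_pairs_of_adjacent_vertices_of_submesh (submesh_num_vertices_vertical : Int) (submesh_num_vertices_horizontal : Int) : Int :=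
  let submesh_num_vertices := submesh_num_vertices_vertical * submesh_num_vertices_horizontal
  (PySem.List.pyRange 0 submesh_num_vertices 1).foldl
    (fun n_pairs v_idx_submesh =>
      (pvIdxOfAllenNeighbours v_idx_submesh submesh_num_vertices_vertical submesh_num_vertices_horizontal).foldl
        (fun n_pairs _ => n_pairs + 1) n_pairs)
    0

-- ===== PORT B =====
def n_pairs_of_adjacent_vertices_of_submesh_alt (submesh_num_vertices_vertical : Int) (submesh_num_vertices_horizontal : Int) : Int :=
  if submesh_num_vertices_vertical ≤ 0 ∨ submesh_num_vertices_horizontal ≤ 0 then 0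
  else submesh_num_vertices_vertical * (submesh_num_vertices_horizontal - 1)
       + submesh_num_vertices_horizontal * (submesh_num_vertices_vertical - 1)
       + 2 * (submesh_num_vertices_vertical - 1) * (submesh_num_vertices_horizontal - 1)

-- ===== PRECONDITION & SPEC =====
-- When V<0 and H<0, A's range(V*H) is non-empty and A returns a meaningless count (4*V*H-2)
-- produced by floor-division artefacts, while B returns 0, the intended pair count for a grid
-- with no vertices.
def D_n_pairs_of_adjacent_vertices_of_submesh (submesh_num_vertices_vertical : Int) (submesh_num_vertices_horizontal : Int) : Prop :=
  submesh_num_vertices_vertical < 0 ∧ submesh_num_vertices_horizontal < 0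
instance (submesh_num_vertices_vertical : Int) (submesh_num_vertices_horizontal : Int) : Decidable (D_n_pairs_of_adjacent_vertices_of_submesh submesh_num_vertices_vertical submesh_num_vertices_horizontal) := by unfold D_n_pairs_of_adjacent_vertices_of_submesh; infer_instance

def Spec_n_pairs_of_adjacent_vertices_of_submesh (submesh_num_vertices_vertical : Int) (submesh_num_vertices_horizontal : Int) (out : Int) : Prop := ¬ D_n_pairs_of_adjacent_vertices_of_submesh submesh_num_vertices_vertical submesh_num_vertices_horizontal → out = n_pairs_of_adjacent_vertices_of_submesh_alt submesh_num_vertices_vertical submesh_num_vertices_horizontal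
instance (submesh_num_vertices_vertical : Int) (submesh_num_vertices_horizontal : Int) (out : Int) : Decidable (Spec_n_pairs_of_adjacent_vertices_of_submesh submesh_num_vertices_vertical submesh_num_vertices_horizontal out) := by unfold Spec_n_pairs_of_adjacent_vertices_of_submesh; infer_instance

def pvDiffWitness_n_pairs_of_adjacent_vertices_of_submesh : Int × Int := (-1, -1)
def pvDiffWitnessOut_n_pairs_of_adjacent_vertices_of_submesh : Int × Int := (2, 0)

-- ===== CLAIM (what is proved, stated in full; the proofs are below) =====
def Claim_unchanged_n_pairs_of_adjacent_vertices_of_submesh : Prop := ∀ (submesh_num_vertices_vertical : Int) (submesh_num_vertices_horizontal : Int), Dom_n_pairs_of_adjacent_vertices_of_submesh submesh_num_vertices_vertical submesh_num_vertices_horizontal → Spec_n_pairs_of_adjacent_vertices_of_submesh submesh_num_vertices_vertical submesh_num_vertices_horizontal (n_pairs_of_adjacent_vertices_of_submesh submesh_num_vertices_vertical submesh_num_vertices_horizontal)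
def Claim_changed_n_pairs_of_adjacent_vertices_of_submesh : Prop := Dom_n_pairs_of_adjacent_vertices_of_submesh (pvDiffWitness_n_pairs_of_adjacent_vertices_of_submesh.1) (pvDiffWitness_n_pairs_of_adjacent_vertices_of_submesh.2) ∧ D_n_pairs_of_adjacent_vertices_of_submesh (pvDiffWitness_n_pairs_of_adjacent_vertices_of_submesh.1) (pvDiffWitness_n_pairs_of_adjacent_vertices_of_submesh.2) ∧ n_pairs_of_adjacent_vertices_of_submesh (pvDiffWitness_n_pairs_of_adjacent_vertices_of_submesh.1) (pvDiffWitness_n_pairs_of_adjacent_vertices_of_submesh.2) = pvDiffWitnessOut_n_pairs_of_adjacent_vertices_of_submesh.1 ∧ n_pairs_of_adjacent_vertices_of_submesh_alt (pvDiffWitness_n_pairs_of_adjacent_vertices_of_submesh.1) (pvDiffWitness_n_pairs_of_adjacent_vertices_of_submesh.2) = pvDiffWitnessOut_n_pairs_of_adjacent_vertices_of_submesh.2 ∧ pvDiffWitnessOut_n_pairs_of_adjacent_vertices_of_submesh.1 ≠ pvDiffWitnessOut_n_pairs_of_adjacent_vertices_of_submesh.2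
def Claim_exact_n_pairs_of_adjacent_vertices_of_submesh : Prop := ∀ (submesh_num_vertices_vertical : Int) (submesh_num_vertices_horizontal : Int), Dom_n_pairs_of_adjacent_vertices_of_submesh submesh_num_vertices_vertical submesh_num_vertices_horizontal → D_n_pairs_of_adjacent_vertices_of_submesh submesh_num_vertices_vertical submesh_num_vertices_horizontal → n_pairs_of_adjacent_vertices_of_submesh submesh_num_vertices_vertical submesh_num_vertices_horizontal ≠ n_pairs_of_adjacent_vertices_of_submesh_alt submesh_num_vertices_vertical submesh_num_vertices_horizontal

-- ===== LEMMAS AND PROOFS =====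

-- the inner `for w in …: n_pairs += 1` loop just adds the list length
theorem pv_foldl_count {α : Type} (l : List α) (a : Int) :
    l.foldl (fun n _ => n + 1) a = a + l.length := by
  induction l generalizing a with
  | nil => simp
  | cons x xs ih => simp [List.foldl_cons, ih]; omega

-- A's result as a sum of neighbour-list lengths
theorem pvA_eq_sum (V H : Int) :
    n_pairs_of_adjacent_vertices_of_submesh V H =
      ((PySem.List.pyRange 0 (V*H) 1).map
        (fun v => ((pvIdxOfAllenNeighbours v V H).length : Int))).sum := by
  unfold n_pairs_of_adjacent_vertices_of_submesh
  have := PySem.List.foldl_add (l := PySem.List.pyRange 0 (V*H) 1)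
      (g := fun v => ((pvIdxOfAllenNeighbours v V H).length : Int)) (a := 0)
  simp only [pv_foldl_count] at *
  simpa using this

-- list-range sum = Finset sum
theorem pv_list_sum_range (f : ℕ → ℤ) (n : ℕ) :
    ((List.range n).map f).sum = ∑ k ∈ Finset.range n, f k := by
  induction n with
  | zero => simp
  | succ m ih => simp [List.range_succ, Finset.sum_range_succ, ih]

-- grid reindexing of a range sum
theorem pv_sum_range_mul (f : ℕ → ℤ) (m n : ℕ) :
    ∑ k ∈ Finset.range (m*n), f k = ∑ x ∈ Finset.range m, ∑ y ∈ Finset.range n, f (x*n + y) := by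
  induction m with
  | zero => simp
  | succ p ih =>
      rw [Nat.succ_mul, Finset.sum_range_add, ih, Finset.sum_range_succ]

-- the length of the Allen neighbour list at grid cell (x, y)
theorem pv_allen_len (a b W Hh : Int) :
    ((pvAllenNeighbours (a, b) W Hh).length : ℤ) =
      (if a ≠ 0 then (1:ℤ) else 0) + (if a ≠ 0 ∧ b ≠ W-1 then (1:ℤ) else 0)
      + (if b ≠ W-1 then (1:ℤ) else 0) + (if a ≠ Hh-1 ∧ b ≠ W-1 then (1:ℤ) else 0) := by
  unfold pvAllenNeighbours
  split_ifs <;> simp_all <;> omega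

theorem pv_len_at (m n x y : ℕ) (hm : 1 ≤ m) (hn : 1 ≤ n) (hx : x < m) (hy : y < n) :
    ((pvIdxOfAllenNeighbours ((x*n+y : ℕ) : Int) (m : Int) (n : Int)).length : ℤ) =
      (if x ≠ 0 then (1:ℤ) else 0) + (if x ≠ 0 ∧ y ≠ n-1 then (1:ℤ) else 0)
      + (if y ≠ n-1 then (1:ℤ) else 0) + (if x ≠ m-1 ∧ y ≠ n-1 then (1:ℤ) else 0) := by
  have hq : (x*n+y)/n = x := by
    rw [Nat.add_comm, Nat.add_mul_div_right _ _ (by omega : 0 < n), Nat.div_eq_of_lt hy]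
    omega
  have hr : (x*n+y) % n = y := by
    rw [Nat.add_comm, Nat.add_mul_mod_self_right, Nat.mod_eq_of_lt hy]
  have hdiv : PySem.Int.floordiv ((x*n+y : ℕ) : Int) (n : Int) = (x : Int) := by
    rw [PySem.Int.floordiv_natCast, hq]
  have hmod : PySem.Int.mod ((x*n+y : ℕ) : Int) (n : Int) = (y : Int) := by
    rw [PySem.Int.mod_natCast, hr]
  unfold pvIdxOfAllenNeighbours pvMatrixCoordFromIdx
  rw [List.length_map]
  rw [show (PySem.Int.floordiv ((x*n+y : ℕ) : Int) (n : Int), PySem.Int.mod ((x*n+y : ℕ) : Int) (n : Int)) = ((x : Int), (y : Int)) from by rw [hdiv, hmod]]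
  rw [pv_allen_len]
  have e1 : ((x : Int) = 0) ↔ (x = 0) := by omega
  have e2 : ((y : Int) = (n : Int) - 1) ↔ (y = n - 1) := by omega
  have e3 : ((x : Int) = (m : Int) - 1) ↔ (x = m - 1) := by omega
  have e4 : ((0 : Int) = (m : Int) - 1) ↔ (0 = m - 1) := by omega
  have e5 : (((n - 1 : ℕ) : Int) = (n : Int) - 1) := by omega
  have e6 : (((m - 1 : ℕ) : Int) = (m : Int) - 1) := by omega
  have e7 : ((m : Int) - 1 = 0) ↔ (m - 1 = 0) := by omega
  have e8 : ((n : Int) - 1 = 0) ↔ (n - 1 = 0) := by omega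
  by_cases h1 : x = 0 <;> by_cases h2 : y = n-1 <;> by_cases h3 : x = m-1 <;>
    simp [e1, e2, e3, e4, e5, e6, e7, e8, h1, h2, h3]

-- sum of an indicator (value c away from the single index a) over range k
theorem pv_sum_ind (k a : ℕ) (ha : a < k) (c : ℤ) :
    ∑ i ∈ Finset.range k, (if i ≠ a then c else 0) = ((k:ℤ) - 1) * c := by
  have base : ∑ i ∈ Finset.range k, (if i = a then (0:ℤ) else 1) = (k:ℤ) - 1 := by
    have h1 : ∀ i, (if i = a then (0:ℤ) else 1) = 1 - (if i = a then (1:ℤ) else 0) := by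
      intro i; by_cases h : i = a <;> simp [h]
    rw [Finset.sum_congr rfl (fun i _ => h1 i), Finset.sum_sub_distrib,
      Finset.sum_ite_eq' (Finset.range k) a (fun _ => (1:ℤ))]
    simp [Finset.mem_range.mpr ha]
  have h2 : ∀ i, (if i ≠ a then c else 0) = (if i = a then (0:ℤ) else 1) * c := by
    intro i; by_cases h : i = a <;> simp [h]
  rw [Finset.sum_congr rfl (fun i _ => h2 i), ← Finset.sum_mul, base]

-- the positive case: A equals the closed form
theorem pvA_closed (m n : ℕ) (hm : 1 ≤ m) (hn : 1 ≤ n) :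
    n_pairs_of_adjacent_vertices_of_submesh (m : Int) (n : Int) =
      (m:ℤ) * ((n:ℤ) - 1) + (n:ℤ) * ((m:ℤ) - 1) + 2 * ((m:ℤ) - 1) * ((n:ℤ) - 1) := by
  rw [pvA_eq_sum, PySem.List.pyRange_one, List.map_map]
  have hN : ((m : Int) * (n : Int) - 0).toNat = m * n := by simp; omega
  rw [hN]
  have hlist : ((List.range (m*n)).map
      ((fun v => ((pvIdxOfAllenNeighbours v (m:Int) (n:Int)).length : Int)) ∘ (fun k : ℕ => (0:Int) + k))).sum
      = ∑ k ∈ Finset.range (m*n), ((pvIdxOfAllenNeighbours (k : Int) (m:Int) (n:Int)).length : Int) := by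
    rw [← pv_list_sum_range (fun k => ((pvIdxOfAllenNeighbours (k : Int) (m:Int) (n:Int)).length : Int)) (m*n)]
    congr 1
    apply List.map_congr_left
    intro k _
    simp
  rw [hlist, pv_sum_range_mul]
  have key : ∀ x ∈ Finset.range m,
      ∑ y ∈ Finset.range n, ((pvIdxOfAllenNeighbours ((x*n+y : ℕ) : Int) (m:Int) (n:Int)).length : ℤ)
      = (if x ≠ 0 then (n:ℤ) else 0) + (if x ≠ 0 then (n:ℤ)-1 else 0)
        + ((n:ℤ)-1) + (if x ≠ m-1 then (n:ℤ)-1 else 0) := by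
    intro x hxm
    have hx := Finset.mem_range.mp hxm
    have point : ∀ y ∈ Finset.range n,
        ((pvIdxOfAllenNeighbours ((x*n+y : ℕ) : Int) (m:Int) (n:Int)).length : ℤ)
        = (if x ≠ 0 then (1:ℤ) else 0)
          + (if y ≠ n-1 then ((if x ≠ 0 then (1:ℤ) else 0) + 1 + (if x ≠ m-1 then (1:ℤ) else 0)) else 0) := by
      intro y hyn
      rw [pv_len_at m n x y hm hn hx (Finset.mem_range.mp hyn)]
      split_ifs <;> omega
    rw [Finset.sum_congr rfl point, Finset.sum_add_distrib, Finset.sum_const, Finset.card_range,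
      pv_sum_ind n (n-1) (by omega)]
    simp only [nsmul_eq_mul]
    split_ifs <;> ring
  rw [Finset.sum_congr rfl key]
  have split : ∀ x, ((if x ≠ 0 then (n:ℤ) else 0) + (if x ≠ 0 then (n:ℤ)-1 else 0)
        + ((n:ℤ)-1) + (if x ≠ m-1 then (n:ℤ)-1 else 0))
      = (if x ≠ 0 then (n:ℤ) else 0) + ((if x ≠ 0 then (n:ℤ)-1 else 0)
        + (((n:ℤ)-1) + (if x ≠ m-1 then (n:ℤ)-1 else 0))) := by intro x; ring
  rw [Finset.sum_congr rfl (fun x _ => split x), Finset.sum_add_distrib, Finset.sum_add_distrib,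
    Finset.sum_add_distrib, Finset.sum_const, Finset.card_range,
    pv_sum_ind m 0 (by omega), pv_sum_ind m 0 (by omega), pv_sum_ind m (m-1) (by omega)]
  simp only [nsmul_eq_mul]
  ring

-- on D_ (both dimensions negative) every step of A's loop adds at least 1
theorem pv_len_pos_of_neg (V H v : Int) (hH : H < 0) :
    1 ≤ ((pvIdxOfAllenNeighbours v V H).length : Int) := by
  have hb := PySem.Int.mod_neg_bounds (a := v) (b := H) hH
  unfold pvIdxOfAllenNeighbours pvMatrixCoordFromIdx pvAllenNeighbours
  have hne : PySem.Int.mod v H ≠ H - 1 := by omega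
  simp only [hne]
  split_ifs <;> simp <;> omega

theorem pv_sum_pos (l : List Int) (hl : l ≠ []) (h : ∀ x ∈ l, 1 ≤ x) : 0 < l.sum := by
  induction l with
  | nil => simp at hl
  | cons a t ih =>
      rcases t with _ | ⟨b, t'⟩
      · simpa using h a (by simp)
      · have := ih (by simp) (fun x hx => h x (List.mem_cons_of_mem a hx))
        have ha := h a (by simp)
        simp only [List.sum_cons] at *
        omega

-- ===== VERDICT (by name: the statement is the Claim_ definition above) =====
theorem n_pairs_of_adjacent_vertices_of_submesh_spec : Claim_unchanged_n_pairs_of_adjacent_vertices_of_submesh := by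
  intro V H _ hD
  unfold D_n_pairs_of_adjacent_vertices_of_submesh at hD
  by_cases hpos : 1 ≤ V ∧ 1 ≤ H
  · obtain ⟨hV, hH⟩ := hpos
    have hm : V = ((V.toNat : ℕ) : Int) := by omega
    have hn : H = ((H.toNat : ℕ) : Int) := by omega
    rw [hm, hn, pvA_closed V.toNat H.toNat (by omega) (by omega)]
    unfold n_pairs_of_adjacent_vertices_of_submesh_alt
    rw [if_neg (by push_neg; omega)]
  · -- some dimension nonpositive, and not both negative: the loop is empty
    have hVH : V * H ≤ 0 := by
      push_neg at hpos hD
      rcases le_or_gt V 0 with h | h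
      · rcases le_or_gt H 0 with h' | h'
        · have : V = 0 ∨ H = 0 := by omega
          rcases this with h0 | h0 <;> simp [h0]
        · exact mul_nonpos_of_nonpos_of_nonneg h (by omega)
      · have : H ≤ 0 := by omega
        exact mul_nonpos_of_nonneg_of_nonpos (by omega) this
    rw [pvA_eq_sum, PySem.List.pyRange_one_eq_nil (by omega)]
    unfold n_pairs_of_adjacent_vertices_of_submesh_alt
    rw [if_pos (by push_neg at hpos; omega)]
    simp

theorem n_pairs_of_adjacent_vertices_of_submesh_changed : Claim_changed_n_pairs_of_adjacent_vertices_of_submesh := by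
  unfold Claim_changed_n_pairs_of_adjacent_vertices_of_submesh; decide

theorem n_pairs_of_adjacent_vertices_of_submesh_tight : Claim_exact_n_pairs_of_adjacent_vertices_of_submesh := by
  intro V H _ hD
  obtain ⟨hV, hH⟩ := hD
  have hB : n_pairs_of_adjacent_vertices_of_submesh_alt V H = 0 := by
    unfold n_pairs_of_adjacent_vertices_of_submesh_alt
    rw [if_pos (Or.inl (by omega))]
  rw [hB, pvA_eq_sum]
  have hpos : 0 < (((PySem.List.pyRange 0 (V*H) 1).map
      (fun v => ((pvIdxOfAllenNeighbours v V H).length : Int)))).sum := by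
    apply pv_sum_pos
    · have : 1 ≤ V * H := by
        have := mul_pos (a := -V) (b := -H) (by omega) (by omega)
        nlinarith
      simp only [ne_eq, List.map_eq_nil_iff]
      intro hnil
      have := PySem.List.length_pyRange_one (a := (0:Int)) (b := V*H)
      rw [hnil] at this
      simp at this
      omega
    · intro x hx
      simp only [List.mem_map] at hx
      obtain ⟨v, _, rfl⟩ := hx
      exact pv_len_pos_of_neg V H v hH
  omega
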